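-- pv_equiv track=rewrite | github.com/PaoDerDoktor/aoc2021 | day 24/part1.py | get_pattern
-- ===== SOURCE A (Python) =====
-- def get_pattern(instructions: list[str]) -> list[str]:
--     pattern: list[str] = []
--     first:   bool      = True
--     for instruction in instructions:
--         if instruction == instructions[0]:
--             if first:
--                 first = False
--             else:
--                 break
--         pattern.append(instruction)
--     return pattern
-- ===== SOURCE B (Python) =====
-- def get_pattern(instructions: list[str]) -> list[str]:
--     if not instructions:
--         return []
--     try:
--         i = instructions.index(instructions[0], 1)
--     except ValueError:
--         return list(instructions)
--     return instructions[:i]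
-- ===== Notes on version B (the rewrite author's own statement) =====
-- stated objective: simpler
-- what changed: A's flag-driven accumulate-and-break loop is replaced by locating the second occurrence of the first instruction with list.index and returning the slice up to it (or a copy of the whole list if there is none).
import Mathlib
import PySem

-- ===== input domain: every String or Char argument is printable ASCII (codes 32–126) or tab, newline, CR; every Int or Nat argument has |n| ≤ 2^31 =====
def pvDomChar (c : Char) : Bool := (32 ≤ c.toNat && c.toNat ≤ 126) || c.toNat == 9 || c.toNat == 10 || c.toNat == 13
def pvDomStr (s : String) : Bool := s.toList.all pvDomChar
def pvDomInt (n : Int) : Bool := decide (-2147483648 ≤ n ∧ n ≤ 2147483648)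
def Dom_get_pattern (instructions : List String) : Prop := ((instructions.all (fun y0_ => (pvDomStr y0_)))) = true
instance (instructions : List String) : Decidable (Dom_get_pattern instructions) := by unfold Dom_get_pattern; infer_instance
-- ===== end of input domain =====

-- B replaces A's flag-driven accumulate-and-break loop by locating the second
-- occurrence of the first instruction and slicing up to it (objective: simpler).

-- ===== PORT A =====
-- A's for-loop with the `first` flag and `break`, as structural recursion over the
-- remaining instructions; `head` is instructions[0] (only ever read when the loop
-- body runs, so matching the list to obtain it is exact).
def getPatternLoop (head : String) : List String → List String → Bool → List String
  | [], pat, _ => pat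
  | x :: xs, pat, first =>
    if x == head then
      if first then getPatternLoop head xs (pat ++ [x]) false
      else pat                                   -- break
    else getPatternLoop head xs (pat ++ [x]) first

def get_pattern (instructions : List String) : List String :=
  match instructions with
  | [] => []                                     -- loop body never runs
  | h :: t => getPatternLoop h (h :: t) [] true

-- ===== PORT B =====
-- Source B: index of the second occurrence via instructions.index(instructions[0], 1)
-- = PySem.List.index? on the tail (result i_tail = i - 1); instructions[:i] with
-- 0 ≤ i = take i (exact for a nonnegative in-range bound).
def get_pattern_alt (instructions : List String) : List String :=
  match instructions with
  | [] => []
  | h :: t =>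
    match PySem.List.index? t h with
    | none => h :: t                             -- ValueError: copy of the whole list
    | some i => (h :: t).take (i + 1)            -- instructions[:i], i = i_tail + 1

-- ===== PRECONDITION & SPEC =====
def Spec_get_pattern (instructions : List String) (out : List String) : Prop := out = get_pattern_alt instructions
instance (instructions : List String) (out : List String) : Decidable (Spec_get_pattern instructions out) := by unfold Spec_get_pattern; infer_instance

-- ===== CLAIM (what is proved, stated in full; the proofs are below) =====
def Claim_equal_get_pattern : Prop := ∀ (instructions : List String), Dom_get_pattern instructions → Spec_get_pattern instructions (get_pattern instructions)

-- ===== LEMMAS AND PROOFS =====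

-- After the first element, A's loop appends until the next occurrence of `head`.
theorem getPatternLoop_false (head : String) (t pat : List String) :
    getPatternLoop head t pat false =
      pat ++ (match PySem.List.index? t head with
              | none => t
              | some i => t.take i) := by
  induction t generalizing pat with
  | nil => simp [getPatternLoop, PySem.List.index?]
  | cons x xs ih =>
    by_cases hx : x = head
    · subst hx
      rw [PySem.List.index?_cons_self]
      simp [getPatternLoop]
    · rw [PySem.List.index?_cons_of_ne xs hx]
      simp only [getPatternLoop, beq_iff_eq, if_neg hx]
      rw [ih]
      cases PySem.List.index? xs head with
      | none => simp
      | some i => simp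

-- ===== VERDICT (by name: the statement is the Claim_ definition above) =====
theorem get_pattern_spec : Claim_equal_get_pattern := by
  intro instructions _
  unfold Spec_get_pattern
  cases instructions with
  | nil => rfl
  | cons h t =>
    show getPatternLoop h (h :: t) [] true = _
    simp only [getPatternLoop, beq_self_eq_true, if_pos]
    rw [getPatternLoop_false]
    unfold get_pattern_alt
    cases hidx : PySem.List.index? t h with
    | none => simp only [hidx]; simp
    | some i => simp only [hidx]; simp
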